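-- pv_equiv track=rewrite | github.com/sophiefy/VITS-Trilingual | text/cleaners.py | add_tone
-- ===== SOURCE A (Python) =====
-- _japanese_vowels = ['a', 'i', 'u', 'e', 'o']
--
-- _hatsuon = ['N']
--
-- def add_tone(text, low=True):
--     new_text = []
--     length = len(text)
--     for i, char in enumerate(text):
--         new_text.append(char)
--         if char in (_japanese_vowels + _hatsuon):
--             if low:
--                 new_text.append('1')
--             else:
--                 new_text.append('3')
--         else:
--             continue
--     return ''.join(new_text)
-- ===== SOURCE B (Python) =====
-- _japanese_vowels = ['a', 'i', 'u', 'e', 'o']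
--
-- _hatsuon = ['N']
--
-- def add_tone(text, low=True):
--     marker = '1' if low else '3'
--     for c in _japanese_vowels + _hatsuon:
--         text = text.replace(c, c + marker)
--     return text
-- ===== Notes on version B (the rewrite author's own statement) =====
-- stated objective: faster
-- what changed: Replaces A's single per-character Python loop (append char, branch on membership in a freshly concatenated list, join) by six staged whole-string str.replace passes, one per vowel/hatsuon character, each rewriting c to c+marker; correct because the passes target distinct characters and never re-touch inserted text.
import Mathlib
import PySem

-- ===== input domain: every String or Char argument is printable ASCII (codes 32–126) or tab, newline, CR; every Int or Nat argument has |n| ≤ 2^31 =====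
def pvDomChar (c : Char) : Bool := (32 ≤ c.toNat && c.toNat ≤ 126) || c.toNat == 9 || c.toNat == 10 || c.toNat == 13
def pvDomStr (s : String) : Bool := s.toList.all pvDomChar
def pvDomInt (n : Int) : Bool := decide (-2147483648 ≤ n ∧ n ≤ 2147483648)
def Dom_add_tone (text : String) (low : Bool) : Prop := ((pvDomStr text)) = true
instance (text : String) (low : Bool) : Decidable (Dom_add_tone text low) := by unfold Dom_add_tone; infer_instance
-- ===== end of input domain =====

-- B replaces A's single per-character loop-and-branch by six staged whole-string str.replace passes (one per special character); same O(n), a different decomposition.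

-- ===== PORT A =====
def japaneseVowels : List Char := ['a', 'i', 'u', 'e', 'o']
def hatsuon : List Char := ['N']

-- literal port of A: fold over the characters, appending the char and possibly a tone digit, then ''.join
def add_tone (text : String) (low : Bool) : String :=
  let new_text : List String :=
    text.toList.foldl (fun acc c =>
      let acc := acc ++ [String.ofList [c]]
      if c ∈ japaneseVowels ++ hatsuon then
        if low then acc ++ ["1"] else acc ++ ["3"]
      else acc) []
  PySem.Str.join "" new_text

-- ===== PORT B =====
-- port of B: for each special character, one whole-string replace pass c → c+marker
def add_tone_alt (text : String) (low : Bool) : String :=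
  let marker : Char := if low then '1' else '3'
  (japaneseVowels ++ hatsuon).foldl
    (fun t c => PySem.Str.replace t (String.ofList [c]) (String.ofList [c, marker])) text

-- ===== PRECONDITION & SPEC =====
def Spec_add_tone (text : String) (low : Bool) (out : String) : Prop := out = add_tone_alt text low
instance (text : String) (low : Bool) (out : String) : Decidable (Spec_add_tone text low out) := by unfold Spec_add_tone; infer_instance

-- ===== CLAIM (what is proved, stated in full; the proofs are below) =====
def Claim_equal_add_tone : Prop := ∀ (text : String) (low : Bool), Dom_add_tone text low → Spec_add_tone text low (add_tone text low)

-- ===== LEMMAS AND PROOFS =====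

-- replace.go with a single-character pattern expands every hit, in one pass
lemma go_single (c m : Char) (l acc : List Char) (fuel : Nat) (h : l.length ≤ fuel) :
    PySem.Chars.replace.go [c] [c, m] fuel l acc
      = acc.reverse ++ l.flatMap (fun x => if x = c then [c, m] else [x]) := by
  induction l generalizing fuel acc with
  | nil =>
    cases fuel <;> simp [PySem.Chars.replace.go]
  | cons x t ih =>
    cases fuel with
    | zero => simp at h
    | succ n =>
      rw [PySem.Chars.replace.go]
      by_cases hx : x = c
      · subst hx
        have hp : [x].isPrefixOf (x :: t) = true := by
          simp [List.isPrefixOf]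
        rw [if_pos hp]
        have hd : List.drop [x].length (x :: t) = t := by simp
        rw [hd, ih _ _ (by simpa using Nat.le_of_succ_le_succ h)]
        simp
      · have hp : [c].isPrefixOf (x :: t) = false := by
          simp [List.isPrefixOf]
          exact fun hh => hx hh.symm
        rw [if_neg (by simp [hp])]
        rw [ih _ _ (by simpa using Nat.le_of_succ_le_succ h)]
        simp [hx]

-- replace with a single-character pattern = flatMap of the pointwise expansion
lemma replace_single (c m : Char) (l : List Char) :
    PySem.Chars.replace l [c] [c, m] = l.flatMap (fun x => if x = c then [c, m] else [x]) := by
  rw [PySem.Chars.replace]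
  simp [go_single c m l [] l.length (le_refl _)]

-- chaining one replace pass per character of cs (cs duplicate-free, marker not in cs)
-- collapses to a single flatMap keyed on membership in cs
lemma chain (m : Char) (cs : List Char) (hnd : cs.Nodup) (hm : m ∉ cs) (l : List Char) :
    cs.foldl (fun t c => PySem.Chars.replace t [c] [c, m]) l
      = l.flatMap (fun x => if x ∈ cs then [x, m] else [x]) := by
  induction cs generalizing l with
  | nil => simp
  | cons c cs ih =>
    have hc : c ∉ cs := (List.nodup_cons.mp hnd).1
    have hm' : m ∉ cs := fun h => hm (List.mem_cons_of_mem _ h)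
    have hmc : m ≠ c := fun h => hm (h ▸ List.mem_cons_self)
    simp only [List.foldl_cons]
    rw [replace_single, ih (List.nodup_cons.mp hnd).2 hm', List.flatMap_assoc]
    apply List.flatMap_congr
    intro x _
    by_cases hx : x = c
    · subst hx
      simp [List.flatMap_cons, hc, hm']
    · simp [hx, List.mem_cons]

-- A's fold, with accumulator generalized, produces the per-char expansions
lemma foldA_eq (low : Bool) (cs : List Char) (acc : List String) :
    (cs.foldl (fun acc c =>
      let acc := acc ++ [String.ofList [c]]
      if c ∈ japaneseVowels ++ hatsuon then
        if low then acc ++ ["1"] else acc ++ ["3"]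
      else acc) acc)
    = acc ++ cs.flatMap (fun c =>
        [String.ofList [c]] ++ (if c ∈ japaneseVowels ++ hatsuon then [if low then "1" else "3"] else [])) := by
  induction cs generalizing acc with
  | nil => simp
  | cons c cs ih =>
    simp only [List.foldl_cons, List.flatMap_cons]
    rw [ih]
    by_cases h : c ∈ japaneseVowels ++ hatsuon <;> cases low <;> simp [h]

-- ''.join concatenates the character lists
lemma join_empty_sep (l : List (List Char)) :
    PySem.Chars.join [] l = l.flatten := by
  induction l with
  | nil => simp [PySem.Chars.join_nil]
  | cons x xs ih =>
    cases xs with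
    | nil => simp [PySem.Chars.join_singleton]
    | cons y ys => rw [PySem.Chars.join_cons_cons]; simp_all

-- ===== VERDICT (by name: the statement is the Claim_ definition above) =====
theorem add_tone_spec : Claim_equal_add_tone := by
  intro text low _
  unfold Spec_add_tone add_tone add_tone_alt
  simp only []
  apply String.toList_injective
  -- B side: move the String fold to a List Char fold, then collapse the six passes
  have hB : ∀ (cs : List Char) (s : String),
      (cs.foldl (fun t c => PySem.Str.replace t (String.ofList [c]) (String.ofList [c, if low then '1' else '3'])) s).toList
      = cs.foldl (fun t c => PySem.Chars.replace t [c] [c, if low then '1' else '3']) s.toList := by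
    intro cs
    induction cs with
    | nil => intro s; rfl
    | cons c cs ih =>
      intro s
      simp only [List.foldl_cons]
      rw [ih, PySem.Str.toList_replace]
      simp [String.toList_ofList]
  rw [hB, chain (if low then '1' else '3') (japaneseVowels ++ hatsuon)
        (by cases low <;> decide) (by cases low <;> decide)]
  -- A side: the fold builds the per-char expansions, ''.join flattens them
  rw [foldA_eq, PySem.Str.join]
  simp only [List.nil_append, String.toList_ofList]
  have hsep : ("" : String).toList = ([] : List Char) := rfl
  rw [hsep, join_empty_sep]
  induction text.toList with
  | nil => simp
  | cons c cs ih =>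
    simp only [List.map_cons, List.flatMap_cons, List.flatten_append, List.map_append]
    rw [← ih]
    by_cases h : c ∈ japaneseVowels ++ hatsuon <;> cases low <;>
      simp [h, String.toList_ofList]
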